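-- pv_equiv track=rewrite | github.com/Lincoln-LM/rngred | rng.py | quick_frame_to_state
-- ===== SOURCE A (Python) =====
-- def next_quick(seed):
--     return (seed*5+13) & 0xFF
--
-- def quick_frame_to_state(frame): # quick way to get state from frame
--     seed = 0
--     seed1 = 1
--     addindex = frame%256
--     for _ in range(addindex):
--         seed = next_quick(seed)
--
--     subindex = frame%255
--     for _ in range(addindex+(subindex-addindex)):
--         seed1 = next_quick(seed1)
--
--     return(hex(seed1 << 8 | seed)[2:].zfill(4))
-- ===== SOURCE B (Python) =====
-- def step_closed(n, s0):
--     # closed form of n iterations of s -> (s*5+13) & 0xFF starting from s0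
--     p = pow(5, n)
--     return (p * s0 + 13 * ((p - 1) // 4)) & 0xFF
--
-- def quick_frame_to_state(frame):
--     seed = step_closed(frame % 256, 0)
--     seed1 = step_closed(frame % 255, 1)
--     return hex(seed1 << 8 | seed)[2:].zfill(4)
-- ===== Notes on version B (the rewrite author's own statement) =====
-- stated objective: alternative
-- what changed: Replaces A's two counted loops of affine-LCG iterations by a closed form: compute p = pow(base, n) and derive each seed in one masked arithmetic expression via the exact geometric-sum division, then the same hex formatting.
import Mathlib
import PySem

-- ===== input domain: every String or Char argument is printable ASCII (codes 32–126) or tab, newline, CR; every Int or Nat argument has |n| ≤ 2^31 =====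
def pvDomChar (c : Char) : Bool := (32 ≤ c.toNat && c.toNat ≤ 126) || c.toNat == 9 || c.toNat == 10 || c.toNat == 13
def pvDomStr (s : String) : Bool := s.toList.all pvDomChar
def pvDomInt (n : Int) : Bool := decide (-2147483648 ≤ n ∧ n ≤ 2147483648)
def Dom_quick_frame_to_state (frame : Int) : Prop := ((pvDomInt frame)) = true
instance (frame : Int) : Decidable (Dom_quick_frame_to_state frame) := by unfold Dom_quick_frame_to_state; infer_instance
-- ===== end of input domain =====

-- B replaces A's two O(frame%256)-step LCG loops by the closed form of s → (s*5+13) & 0xFF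
-- (p = 5^n; result = (p*s0 + 13*(p-1)//4) & 0xFF), keeping the identical hex formatting: objective 'alternative'.

-- shared helper: hex(x)[2:].zfill(4) for nonnegative x (both Pythons end with this very
-- expression; Nat.toDigits 16 produces Python's lowercase hex digits, exact for x ≥ 0 —
-- both programs only reach it with x ≥ 0).
def pyHex4 (x : Int) : String :=
  PySem.Str.zfill (String.ofList (Nat.toDigits 16 x.toNat)) 4

-- ===== PORT A =====
def next_quick (seed : Int) : Int := PySem.Int.band (seed * 5 + 13) 255

def quick_frame_to_state (frame : Int) : String :=
  let seed : Int := 0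
  let seed1 : Int := 1
  let addindex := PySem.Int.mod frame 256
  let seed := (PySem.List.pyRange 0 addindex 1).foldl (fun s _ => next_quick s) seed
  let subindex := PySem.Int.mod frame 255
  let seed1 := (PySem.List.pyRange 0 (addindex + (subindex - addindex)) 1).foldl
      (fun s _ => next_quick s) seed1
  pyHex4 (PySem.Int.bor (seed1 <<< (8 : Nat)) seed)

-- ===== PORT B =====
def step_closed (n : Int) (s0 : Int) : Int :=
  let p : Int := 5 ^ n.toNat   -- pow(5, n); both call sites pass n ≥ 0
  PySem.Int.band (p * s0 + 13 * PySem.Int.floordiv (p - 1) 4) 255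

def quick_frame_to_state_alt (frame : Int) : String :=
  let seed := step_closed (PySem.Int.mod frame 256) 0
  let seed1 := step_closed (PySem.Int.mod frame 255) 1
  pyHex4 (PySem.Int.bor (seed1 <<< (8 : Nat)) seed)

-- ===== PRECONDITION & SPEC =====
def Spec_quick_frame_to_state (frame : Int) (out : String) : Prop := out = quick_frame_to_state_alt frame
instance (frame : Int) (out : String) : Decidable (Spec_quick_frame_to_state frame out) := by unfold Spec_quick_frame_to_state; infer_instance

-- ===== CLAIM (what is proved, stated in full; the proofs are below) =====
def Claim_equal_quick_frame_to_state : Prop := ∀ (frame : Int), Dom_quick_frame_to_state frame → Spec_quick_frame_to_state frame (quick_frame_to_state frame)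

-- ===== LEMMAS AND PROOFS =====

-- masking a nonnegative int with 0xFF is reduction mod 256
lemma band255_eq_emod (a : Int) (ha : 0 ≤ a) : PySem.Int.band a 255 = a % 256 := by
  rw [PySem.Int.band_of_nonneg ha (by norm_num)]
  have := Nat.and_two_pow_sub_one_eq_mod a.toNat 8
  norm_num at this
  simp [this]
  omega

lemma pow5_mod4 (n : Nat) : ∃ k : Int, 0 ≤ k ∧ (5 : Int) ^ n = 4 * k + 1 := by
  induction n with
  | zero => exact ⟨0, by norm_num⟩
  | succ n ih =>
    obtain ⟨k, hk0, hk⟩ := ih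
    exact ⟨5 * k + 1, by omega, by rw [pow_succ, hk]; ring⟩

-- n iterations of next_quick from s0 ∈ [0, 256) equal B's closed form
lemma iterate_next_quick (n : Nat) (s0 : Int) (h0 : 0 ≤ s0) (h1 : s0 < 256) :
    next_quick^[n] s0
      = PySem.Int.band ((5 : Int) ^ n * s0 + 13 * PySem.Int.floordiv ((5 : Int) ^ n - 1) 4) 255 := by
  induction n with
  | zero =>
    simp [PySem.Int.floordiv]
    rw [band255_eq_emod s0 h0]
    omega
  | succ n ih =>
    obtain ⟨k, hk0, hk⟩ := pow5_mod4 n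
    have hdivn : PySem.Int.floordiv ((5 : Int) ^ n - 1) 4 = k := by
      rw [PySem.Int.floordiv_eq_ediv_of_pos (by norm_num)]
      rw [hk]
      have : (4 : Int) * k + 1 - 1 = 4 * k := by ring
      rw [this, Int.mul_ediv_cancel_left _ (by norm_num)]
    have hdivsn : PySem.Int.floordiv ((5 : Int) ^ (n + 1) - 1) 4 = 5 * k + 1 := by
      rw [PySem.Int.floordiv_eq_ediv_of_pos (by norm_num)]
      rw [pow_succ, hk]
      have : (4 : Int) * k + 1 - 1 = 4 * k := by ring
      have h2 : ((4 : Int) * k + 1) * 5 - 1 = 4 * (5 * k + 1) := by ring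
      rw [mul_comm ((4 : Int) * k + 1) 5] at h2 ⊢
      rw [h2, Int.mul_ediv_cancel_left _ (by norm_num)]
    rw [Function.iterate_succ_apply', ih, hdivn, hdivsn]
    set C : Int := (5 : Int) ^ n * s0 + 13 * k with hC
    have hCnn : 0 ≤ C := by
      have : (0:Int) ≤ (5:Int)^n := by positivity
      have := mul_nonneg this h0
      omega
    have hm : 0 ≤ C % 256 := Int.emod_nonneg C (by norm_num)
    unfold next_quick
    rw [band255_eq_emod C hCnn, band255_eq_emod (C % 256 * 5 + 13) (by omega),
        band255_eq_emod ((5:Int)^(n+1) * s0 + 13 * (5 * k + 1)) (by nlinarith [pow_nonneg (by norm_num : (0:Int) ≤ 5) (n+1), mul_nonneg (pow_nonneg (by norm_num : (0:Int) ≤ 5) (n+1)) h0])]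
    have hexp : (5:Int)^(n+1) * s0 + 13 * (5 * k + 1) = C * 5 + 13 := by
      rw [hC, pow_succ]; ring
    rw [hexp]
    omega

-- ===== VERDICT (by name: the statement is the Claim_ definition above) =====
theorem quick_frame_to_state_spec : Claim_equal_quick_frame_to_state := by
  intro frame _
  unfold Spec_quick_frame_to_state quick_frame_to_state quick_frame_to_state_alt step_closed
  simp only []
  have h256 : (0:Int) < 256 := by norm_num
  have h255 : (0:Int) < 255 := by norm_num
  set a := PySem.Int.mod frame 256 with ha
  set b := PySem.Int.mod frame 255 with hb
  have hsimpb : a + (b - a) = b := by ring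
  rw [hsimpb]
  have key : ∀ (c s0 : Int), 0 ≤ s0 → s0 < 256 →
      (PySem.List.pyRange 0 c 1).foldl (fun s _ => next_quick s) s0
        = PySem.Int.band ((5:Int) ^ c.toNat * s0 + 13 * PySem.Int.floordiv ((5:Int) ^ c.toNat - 1) 4) 255 := by
    intro c s0 hs0 hs1
    rw [List.foldl_const next_quick s0 (PySem.List.pyRange 0 c 1)]
    rw [PySem.List.length_pyRange_one]
    simp only [Int.sub_zero]
    exact iterate_next_quick c.toNat s0 hs0 hs1
  rw [key a 0 le_rfl (by norm_num), key b 1 (by norm_num) (by norm_num)]
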